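-- pv_equiv track=rewrite | github.com/tipsyboy/Algorithm | Programmers/step/01_level1/3진법뒤집기.py | solution
-- ===== SOURCE A (Python) =====
-- def solution(n):
--     base3_reverse = []  #
--     ans = 0
--
--     while n > 0:
--         r = n % 3  # remainder
--         n = n // 3  # q
--
--         base3_reverse.append(r)
--
--     base3_digit = len(base3_reverse) - 1
--
--     for idx, b in enumerate(base3_reverse):
--         ans += b * (3 ** (base3_digit - idx))
--
--     return ans
-- ===== SOURCE B (Python) =====
-- def solution(n):
--     # Single-pass Horner accumulation: no digit list, no power computation.
--     ans = 0
--     while n > 0: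
--         ans = ans * 3 + n % 3
--         n //= 3
--     return ans
-- ===== Notes on version B (the rewrite author's own statement) =====
-- stated objective: simpler
-- what changed: Replaces the two-pass list-building version (collect base-3 digits, then sum b*3**(len-1-idx)) with a single-pass Horner accumulator ans = ans*3 + n%3, keeping no digit list and computing no explicit powers.
import Mathlib
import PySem

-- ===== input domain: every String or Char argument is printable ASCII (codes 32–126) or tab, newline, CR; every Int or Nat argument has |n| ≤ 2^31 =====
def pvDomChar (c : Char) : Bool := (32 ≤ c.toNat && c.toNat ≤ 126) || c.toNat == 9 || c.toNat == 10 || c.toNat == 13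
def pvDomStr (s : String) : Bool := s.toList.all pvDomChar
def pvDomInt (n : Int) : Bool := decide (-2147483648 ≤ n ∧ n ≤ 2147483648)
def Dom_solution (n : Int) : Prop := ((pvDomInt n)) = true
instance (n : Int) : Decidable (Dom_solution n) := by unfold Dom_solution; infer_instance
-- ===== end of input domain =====

-- B replaces A's two passes (collect base-3 digits into a list, then sum b*3^(len-1-idx))
-- with a single-pass Horner accumulator ans = ans*3 + n%3; objective: simpler.


-- termination helper for the while-loops (cited by decreasing_by in both ports)
theorem pvFloordiv3_toNat_lt (n : Int) (h : n > 0) :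
    (PySem.Int.floordiv n 3).toNat < n.toNat := by
  rw [PySem.Int.floordiv_eq_ediv_of_pos (by norm_num)]
  omega

-- ===== PORT A =====
-- the while-loop: appends n % 3 and continues with n // 3; produces base3_reverse
def solutionDigits (n : Int) : List Int :=
  if h : n > 0 then
    PySem.Int.mod n 3 :: solutionDigits (PySem.Int.floordiv n 3)
  else []
termination_by n.toNat
decreasing_by exact pvFloordiv3_toNat_lt n h

-- the for-loop over enumerate(base3_reverse): idx is the enumerate counter.
-- base3_digit - idx is always ≥ 0 inside the loop, so the Nat exponent is exact.
def solutionSum (ds : List Int) (base3_digit : Nat) (idx : Nat) (ans : Int) : Int :=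
  match ds with
  | [] => ans
  | b :: t => solutionSum t base3_digit (idx + 1) (ans + b * (3 : Int) ^ (base3_digit - idx))

def solution (n : Int) : Int :=
  let base3_reverse := solutionDigits n
  -- len(base3_reverse) - 1: Nat subtraction; when the list is empty the for-loop
  -- never runs, so the value of base3_digit is irrelevant, matching Python's -1.
  solutionSum base3_reverse (base3_reverse.length - 1) 0 0

-- ===== PORT B =====
def solutionAltGo (n : Int) (ans : Int) : Int :=
  if h : n > 0 then
    solutionAltGo (PySem.Int.floordiv n 3) (ans * 3 + PySem.Int.mod n 3)
  else ans
termination_by n.toNat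
decreasing_by exact pvFloordiv3_toNat_lt n h

def solution_alt (n : Int) : Int := solutionAltGo n 0

-- ===== PRECONDITION & SPEC =====
def Spec_solution (n : Int) (out : Int) : Prop := out = solution_alt n
instance (n : Int) (out : Int) : Decidable (Spec_solution n out) := by unfold Spec_solution; infer_instance

-- ===== CLAIM (what is proved, stated in full; the proofs are below) =====
def Claim_equal_solution : Prop := ∀ (n : Int), Dom_solution n → Spec_solution n (solution n)

-- ===== LEMMAS AND PROOFS =====
-- Horner fold over a digit list
def pvHorner (ans : Int) (ds : List Int) : Int := ds.foldl (fun a b => a * 3 + b) ans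

theorem pvHorner_shift (ds : List Int) (a : Int) :
    pvHorner a ds = a * (3 : Int) ^ ds.length + pvHorner 0 ds := by
  induction ds generalizing a with
  | nil => simp [pvHorner]
  | cons c t ih =>
      simp only [pvHorner, List.foldl_cons, List.length_cons]
      rw [show (List.foldl (fun a b => a * 3 + b) (a * 3 + c) t) = pvHorner (a * 3 + c) t from rfl,
          ih (a * 3 + c), show (List.foldl (fun a b => a * 3 + b) (0 * 3 + c) t) = pvHorner (0 * 3 + c) t from rfl,
          ih (0 * 3 + c)]
      ring

theorem pvSum_eq_horner (ds : List Int) (L idx : Nat) (ans : Int)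
    (h : L + 1 = idx + ds.length) :
    solutionSum ds L idx ans = ans + pvHorner 0 ds := by
  induction ds generalizing idx ans with
  | nil => simp [solutionSum, pvHorner]
  | cons b t ih =>
      simp only [solutionSum]
      rw [ih (idx + 1) _ (by simp at h ⊢; omega)]
      have hexp : L - idx = t.length := by simp at h; omega
      have h1 := pvHorner_shift t b
      have h2 := pvHorner_shift t (0 * 3 + b)
      simp only [pvHorner] at h1 h2
      simp only [pvHorner, List.foldl_cons, hexp, h1, h2]
      ring

theorem pvAltGo_eq_horner (n : Int) (ans : Int) :
    solutionAltGo n ans = pvHorner ans (solutionDigits n) := by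
  by_cases h : n > 0
  · rw [solutionAltGo, solutionDigits, dif_pos h, dif_pos h]
    rw [pvAltGo_eq_horner (PySem.Int.floordiv n 3)]
    simp [pvHorner]
  · rw [solutionAltGo, solutionDigits, dif_neg h, dif_neg h]
    simp [pvHorner]
termination_by n.toNat
decreasing_by exact pvFloordiv3_toNat_lt n h

-- ===== VERDICT (by name: the statement is the Claim_ definition above) =====
theorem solution_spec : Claim_equal_solution := by
  intro n _
  unfold Spec_solution solution solution_alt
  rw [pvAltGo_eq_horner]
  cases hds : solutionDigits n with
  | nil => simp [solutionSum, pvHorner]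
  | cons b t =>
      rw [pvSum_eq_horner _ _ 0 0 (by simp)]
      simp
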